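-- pv_equiv track=rewrite | github.com/bradleymont/UCLA-CS-CM122 | stepik/chapter9/9_10/bwMatching/bwMatching.py | mapOccurrences
-- ===== SOURCE A (Python) =====
-- def mapOccurrences(s):
--     occurrenceToIndex = {}
--     indexToOccurrence = {}
--
--     # maps each character to the amount of occurrences so far in the string
--     charCounts = {}
--
--     for i in range(len(s)):
--         currChar = s[i]
--
--         # get k (where currChar is the k-th occurrence of that character)
--         k = 1
--         if currChar in charCounts:
--             k = charCounts[currChar] + 1
--
--         # make the key and update maps
--         occurenceKey = currChar + '_' + str(k)
--         occurrenceToIndex[occurenceKey] = i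
--         indexToOccurrence[i] = occurenceKey
--
--         # update charCounts
--         if currChar in charCounts:
--             charCounts[currChar] += 1
--         else:
--             charCounts[currChar] = 1
--
--     return occurrenceToIndex, indexToOccurrence
-- ===== SOURCE B (Python) =====
-- def mapOccurrences(s):
--     # Pass 1: total count of each character.
--     remaining = {}
--     for c in s:
--         remaining[c] = remaining.get(c, 0) + 1
--     # Pass 2: walk the string right-to-left; the occurrence number of s[i] is
--     # the number of copies of s[i] still remaining (i.e. its count in s[:i+1]).
--     occ_items = []
--     idx_items = []
--     for i in range(len(s) - 1, -1, -1):
--         c = s[i]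
--         key = c + '_' + str(remaining[c])
--         remaining[c] -= 1
--         occ_items.append((key, i))
--         idx_items.append((i, key))
--     # Keys and indices are unique, so building the dicts from the reversed pair
--     # lists yields left-to-right insertion order.
--     return dict(reversed(occ_items)), dict(reversed(idx_items))
-- ===== Notes on version B (the rewrite author's own statement) =====
-- stated objective: alternative
-- what changed: Replaces A's single forward pass with an online incrementing counter by a two-phase scheme: one pass builds the total character counts, then a right-to-left pass numbers each position by the count still remaining (decrementing), collecting the pairs back-to-front and building both dicts from the reversed pair lists.
import Mathlib
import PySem

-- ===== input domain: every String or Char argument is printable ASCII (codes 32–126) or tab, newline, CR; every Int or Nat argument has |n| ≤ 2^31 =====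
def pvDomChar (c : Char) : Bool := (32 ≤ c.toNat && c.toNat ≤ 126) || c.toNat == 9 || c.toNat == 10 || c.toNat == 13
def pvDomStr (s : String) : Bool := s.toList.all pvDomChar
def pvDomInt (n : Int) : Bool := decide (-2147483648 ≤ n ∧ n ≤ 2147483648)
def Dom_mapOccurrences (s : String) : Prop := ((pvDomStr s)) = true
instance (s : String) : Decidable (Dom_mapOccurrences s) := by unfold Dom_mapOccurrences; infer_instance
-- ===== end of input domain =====

-- B replaces A's single forward pass with an online counter by two staged passes:
-- total counts first, then a right-to-left numbering pass that decrements the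
-- remaining counts and builds both dicts from the reversed pair lists; objective: alternative.


-- ===== PORT A =====
-- 'currChar + '_' + str(k)' is built at the List Char level (String.ofList), exact for Python string concatenation.
def mapOccurrences (s : String) : (List (String × Int)) × (List (Int × String)) :=
  let st :=
    (PySem.List.enumerate s.toList 0).foldl
      (fun (st : PySem.Dict String Int × PySem.Dict Int String × PySem.Dict String Int) p =>
        let (occurrenceToIndex, indexToOccurrence, charCounts) := st
        let currChar := String.ofList [p.2]
        let k : Int := if charCounts.contains currChar then charCounts.getD currChar 0 + 1 else 1
        let occurenceKey := String.ofList (p.2 :: '_' :: PySem.Int.toChars k)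
        let occurrenceToIndex := occurrenceToIndex.insert occurenceKey p.1
        let indexToOccurrence := indexToOccurrence.insert p.1 occurenceKey
        let charCounts :=
          if charCounts.contains currChar then charCounts.insert currChar (charCounts.getD currChar 0 + 1)
          else charCounts.insert currChar 1
        (occurrenceToIndex, indexToOccurrence, charCounts))
      (PySem.Dict.empty, PySem.Dict.empty, PySem.Dict.empty)
  (st.1.items, st.2.1.items)

-- ===== PORT B =====
-- one step of B's right-to-left loop: 'c = s[i]; key = c+'_'+str(remaining[c]); remaining[c] -= 1; append'
-- (the pyGet? 'none' branch is a totality guard only: every i of the range is in bounds;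
--  'remaining[c]' is ported as getD _ 0, exact because every character of s is a key of remaining)
def pvBodyB (chars : List Char)
    (st : PySem.Dict String Int × List (String × Int) × List (Int × String)) (i : Int) :
    PySem.Dict String Int × List (String × Int) × List (Int × String) :=
  match PySem.List.pyGet? chars i with
  | none => st
  | some ch =>
    let c := String.ofList [ch]
    let key := String.ofList (ch :: '_' :: PySem.Int.toChars (st.1.getD c 0))
    (st.1.insert c (st.1.getD c 0 - 1), st.2.1 ++ [(key, i)], st.2.2 ++ [(i, key)])

def mapOccurrences_alt (s : String) : (List (String × Int)) × (List (Int × String)) :=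
  let chars := s.toList
  -- pass 1: remaining[c] = remaining.get(c, 0) + 1
  let remaining := chars.foldl
    (fun d c => d.insert (String.ofList [c]) (d.getD (String.ofList [c]) 0 + 1)) PySem.Dict.empty
  -- pass 2: for i in range(len(s)-1, -1, -1)
  let st := (PySem.List.pyRange ((chars.length : Int) - 1) (-1) (-1)).foldl (pvBodyB chars)
    (remaining, [], [])
  -- dict(reversed(occ_items)), dict(reversed(idx_items))
  (((st.2.1.reverse).foldl (fun d p => d.insert p.1 p.2) PySem.Dict.empty).items,
   ((st.2.2.reverse).foldl (fun d p => d.insert p.1 p.2) PySem.Dict.empty).items)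

-- ===== PRECONDITION & SPEC =====
def Spec_mapOccurrences (s : String) (out : (List (String × Int)) × (List (Int × String))) : Prop := out = mapOccurrences_alt s
instance (s : String) (out : (List (String × Int)) × (List (Int × String))) : Decidable (Spec_mapOccurrences s out) := by unfold Spec_mapOccurrences; infer_instance

-- ===== CLAIM (what is proved, stated in full; the proofs are below) =====
def Claim_equal_mapOccurrences : Prop := ∀ (s : String), Dom_mapOccurrences s → Spec_mapOccurrences s (mapOccurrences s)

-- ===== LEMMAS AND PROOFS =====

-- the canonical occurrence key of position p.1 = count of p.2 in the inclusive prefix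
def pvKey (cs : List Char) (p : Int × Char) : String :=
  String.ofList (p.2 :: '_' :: PySem.Int.toChars ((cs.take (p.1.toNat + 1)).count p.2 : Int))

theorem pvOfListSingleton_injective : Function.Injective (fun c : Char => String.ofList [c]) := by
  intro a b h
  have h2 := congrArg String.toList h
  simpa using h2

theorem pvKey_mono (cs : List Char) (c : Char) (p : Int × Char) (hp : p ∈ PySem.List.enumerate cs 0) :
    pvKey (cs ++ [c]) p = pvKey cs p := by
  rcases (PySem.List.mem_enumerate_iff cs 0 p).mp hp with ⟨j, hj, rfl⟩
  unfold pvKey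
  have h1 : ((0 : Int) + (j : Int)).toNat = j := by omega
  rw [h1, List.take_append_of_le_length (by omega)]

theorem pvKey_last (cs : List Char) (c : Char) :
    pvKey (cs ++ [c]) (((0 : Int) + (cs.length : Int)), c)
      = String.ofList (c :: '_' :: PySem.Int.toChars ((cs.count c : Int) + 1)) := by
  unfold pvKey
  have h1 : ((0 : Int) + (cs.length : Int)).toNat = cs.length := by omega
  have h2 : (((cs ++ [c]).take (cs.length + 1)).count c : Int) = (cs.count c : Int) + 1 := by
    rw [List.take_of_length_le (by simp)]
    push_cast [List.count_append]
    simp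
  rw [h1, h2]

-- the total-counts dict (A's final charCounts, B's initial remaining)
def pvCC (cs : List Char) : PySem.Dict String Int :=
  (cs.map (fun c => String.ofList [c])).foldl (fun d x => d.insert x (d.getD x 0 + 1)) PySem.Dict.empty

theorem pvCC_getD (cs : List Char) (c : Char) :
    (pvCC cs).getD (String.ofList [c]) 0 = (cs.count c : Int) := by
  unfold pvCC
  rw [PySem.Dict.foldl_insert_getD_add_one_eq_counter, PySem.Dict.getD_counter,
      List.count_map_of_injective cs _ pvOfListSingleton_injective]

theorem pvCC_contains (cs : List Char) (c : Char) :
    (pvCC cs).contains (String.ofList [c]) = cs.contains c := by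
  unfold pvCC
  rw [PySem.Dict.foldl_insert_getD_add_one_eq_counter, PySem.Dict.contains_counter]
  simp only [List.contains_eq_mem, List.mem_map, decide_eq_decide]
  constructor
  · rintro ⟨a, ha, h⟩; rwa [pvOfListSingleton_injective h] at ha
  · intro h; exact ⟨c, h, rfl⟩

theorem pvCC_append (cs : List Char) (c : Char) :
    pvCC (cs ++ [c])
      = (pvCC cs).insert (String.ofList [c]) ((pvCC cs).getD (String.ofList [c]) 0 + 1) := by
  unfold pvCC
  rw [List.map_append, List.foldl_append]
  rfl

-- A's loop computes the canonical folds plus the running counter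
theorem pvLoopA (cs : List Char) :
    (PySem.List.enumerate cs 0).foldl
      (fun (st : PySem.Dict String Int × PySem.Dict Int String × PySem.Dict String Int) p =>
        let (occurrenceToIndex, indexToOccurrence, charCounts) := st
        let currChar := String.ofList [p.2]
        let k : Int := if charCounts.contains currChar then charCounts.getD currChar 0 + 1 else 1
        let occurenceKey := String.ofList (p.2 :: '_' :: PySem.Int.toChars k)
        let occurrenceToIndex := occurrenceToIndex.insert occurenceKey p.1
        let indexToOccurrence := indexToOccurrence.insert p.1 occurenceKey
        let charCounts :=
          if charCounts.contains currChar then charCounts.insert currChar (charCounts.getD currChar 0 + 1)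
          else charCounts.insert currChar 1
        (occurrenceToIndex, indexToOccurrence, charCounts))
      (PySem.Dict.empty, PySem.Dict.empty, PySem.Dict.empty)
    = ( ((PySem.List.enumerate cs 0).map (fun p => (pvKey cs p, p.1))).foldl
          (fun d p => d.insert p.1 p.2) PySem.Dict.empty,
        ((PySem.List.enumerate cs 0).map (fun p => (p.1, pvKey cs p))).foldl
          (fun d p => d.insert p.1 p.2) PySem.Dict.empty,
        pvCC cs ) := by
  induction cs using List.reverseRecOn with
  | nil => rfl
  | append_singleton cs c ih =>
    have hk : (if (pvCC cs).contains (String.ofList [c]) then (pvCC cs).getD (String.ofList [c]) 0 + 1 else 1)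
        = (cs.count c : Int) + 1 := by
      rw [pvCC_getD, pvCC_contains]
      by_cases h : c ∈ cs
      · simp [h]
      · simp [h, List.count_eq_zero_of_not_mem h]
    have hcc : (if (pvCC cs).contains (String.ofList [c])
          then (pvCC cs).insert (String.ofList [c]) ((pvCC cs).getD (String.ofList [c]) 0 + 1)
          else (pvCC cs).insert (String.ofList [c]) 1)
        = pvCC (cs ++ [c]) := by
      rw [pvCC_append]
      by_cases h : (pvCC cs).contains (String.ofList [c]) = true
      · simp [h]
      · simp only [Bool.not_eq_true] at h
        rw [if_neg (by simp [h]), PySem.Dict.getD_of_not_contains _ _ h]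
        norm_num
    have hmap1 : ((PySem.List.enumerate (cs ++ [c]) 0).map (fun p => (pvKey (cs ++ [c]) p, p.1)))
        = ((PySem.List.enumerate cs 0).map (fun p => (pvKey cs p, p.1)))
          ++ [(pvKey (cs ++ [c]) (((0 : Int) + (cs.length : Int)), c), (0 : Int) + (cs.length : Int))] := by
      rw [PySem.List.enumerate_append, List.map_append]
      congr 1
      exact List.map_congr_left (fun p hp => by simp [pvKey_mono cs c p hp])
    have hmap2 : ((PySem.List.enumerate (cs ++ [c]) 0).map (fun p => (p.1, pvKey (cs ++ [c]) p)))
        = ((PySem.List.enumerate cs 0).map (fun p => (p.1, pvKey cs p)))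
          ++ [((0 : Int) + (cs.length : Int), pvKey (cs ++ [c]) (((0 : Int) + (cs.length : Int)), c))] := by
      rw [PySem.List.enumerate_append, List.map_append]
      congr 1
      exact List.map_congr_left (fun p hp => by simp [pvKey_mono cs c p hp])
    rw [hmap1, hmap2, PySem.List.enumerate_append, List.foldl_append,
        List.foldl_append, List.foldl_append, ih, pvKey_last]
    simp only [PySem.List.enumerate, List.foldl]
    rw [← hk, ← hcc]

-- B's right-to-left loop, run on any dict getD-equal to the total counts of cs and any
-- list 'chars' agreeing with cs on the indices below cs.length, appends the reversed
-- canonical pair lists to the accumulators.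
theorem pvLoopB (cs : List Char) : ∀ (chars : List Char) (d : PySem.Dict String Int)
    (acc1 : List (String × Int)) (acc2 : List (Int × String)),
    (∀ k, d.getD k 0 = (pvCC cs).getD k 0) →
    (∀ j : Nat, (h : j < cs.length) → PySem.List.pyGet? chars (j : Int) = some cs[j]) →
    ((PySem.List.pyRange ((cs.length : Int) - 1) (-1) (-1)).foldl (pvBodyB chars) (d, acc1, acc2)).2
      = (acc1 ++ ((PySem.List.enumerate cs 0).map (fun p => (pvKey cs p, p.1))).reverse,
         acc2 ++ ((PySem.List.enumerate cs 0).map (fun p => (p.1, pvKey cs p))).reverse) := by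
  induction cs using List.reverseRecOn with
  | nil =>
    intro chars d acc1 acc2 _ _
    rw [PySem.List.pyRange_neg_one_eq_nil (by simp)]
    simp
  | append_singleton cs c ih =>
    intro chars d acc1 acc2 hd hget
    have hn : ((cs ++ [c]).length : Int) - 1 = (cs.length : Int) := by simp
    have hcons : PySem.List.pyRange ((cs.length : Int)) (-1) (-1)
        = (cs.length : Int) :: PySem.List.pyRange ((cs.length : Int) - 1) (-1) (-1) := by
      exact PySem.List.pyRange_neg_one_cons (by omega)
    have hgetn : PySem.List.pyGet? chars ((cs.length : Int)) = some c := by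
      have := hget cs.length (by simp)
      simpa using this
    have hdc : d.getD (String.ofList [c]) 0 = (cs.count c : Int) + 1 := by
      rw [hd, pvCC_getD]
      push_cast [List.count_append]
      simp
    have hstep : pvBodyB chars (d, acc1, acc2) ((cs.length : Int))
        = (d.insert (String.ofList [c]) (d.getD (String.ofList [c]) 0 - 1),
           acc1 ++ [(String.ofList (c :: '_' :: PySem.Int.toChars ((cs.count c : Int) + 1)), (cs.length : Int))],
           acc2 ++ [((cs.length : Int), String.ofList (c :: '_' :: PySem.Int.toChars ((cs.count c : Int) + 1)))]) := by
      unfold pvBodyB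
      rw [hgetn]
      simp only [hdc]
    have hd' : ∀ k, (d.insert (String.ofList [c]) (d.getD (String.ofList [c]) 0 - 1)).getD k 0
        = (pvCC cs).getD k 0 := by
      intro k
      rw [PySem.Dict.getD_insert]
      by_cases hkc : k = String.ofList [c]
      · rw [if_pos hkc, hkc, hdc, pvCC_getD]; ring
      · rw [if_neg hkc, hd, pvCC_append, PySem.Dict.getD_insert_of_ne _ _ _ hkc]
    have hget' : ∀ j : Nat, (h : j < cs.length) → PySem.List.pyGet? chars (j : Int) = some cs[j] := by
      intro j hj
      have := hget j (by simp; omega)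
      rwa [List.getElem_append_left hj] at this
    rw [hn, hcons, List.foldl_cons, hstep, ih chars _ _ _ hd' hget']
    have hmap1 := List.map_congr_left (l := PySem.List.enumerate cs 0)
      (f := fun p => (pvKey (cs ++ [c]) p, p.1)) (g := fun p => (pvKey cs p, p.1))
      (fun p hp => by simp [pvKey_mono cs c p hp])
    have hmap2 := List.map_congr_left (l := PySem.List.enumerate cs 0)
      (f := fun p => (p.1, pvKey (cs ++ [c]) p)) (g := fun p => (p.1, pvKey cs p))
      (fun p hp => by simp [pvKey_mono cs c p hp])
    rw [PySem.List.enumerate_append, List.map_append, List.map_append, hmap1, hmap2,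
        List.reverse_append, List.reverse_append]
    simp only [PySem.List.enumerate, List.map, List.reverse_cons, List.reverse_nil,
      List.nil_append, List.cons_append, List.append_assoc]
    rw [pvKey_last]
    simp

-- B's first pass is pvCC
theorem pvRemaining (cs : List Char) :
    cs.foldl (fun d c => d.insert (String.ofList [c]) (d.getD (String.ofList [c]) 0 + 1))
      PySem.Dict.empty = pvCC cs := by
  unfold pvCC
  rw [List.foldl_map]

-- ===== VERDICT (by name: the statement is the Claim_ definition above) =====
theorem mapOccurrences_spec : Claim_equal_mapOccurrences := by
  intro s _
  simp only [Spec_mapOccurrences, mapOccurrences, mapOccurrences_alt]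
  rw [pvLoopA, pvRemaining,
      pvLoopB s.toList s.toList (pvCC s.toList) [] [] (fun _ => rfl)
        (fun j hj => by simp [PySem.List.pyGet?_natCast, List.getElem?_eq_getElem hj])]
  simp
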